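-- pv_equiv track=rewrite | github.com/anilmacharla25/charge_entry_bot | office_allay.py | no_of_units
-- ===== SOURCE A (Python) =====
-- def no_of_units(icds: list):
--     count = 0
--     units = ""
--     for unit in range(0, len(icds)):
--         count+=1
--         if count==5:
--             break
--         units = units + str(count)
--     return units
-- ===== SOURCE B (Python) =====
-- def no_of_units(icds: list):
--     return "1234"[:len(icds)]
-- ===== Notes on version B (the rewrite author's own statement) =====
-- stated objective: simpler
-- what changed: Replaces the counting loop with string accumulation by a closed-form clamped slice of the literal "1234".
import Mathlib
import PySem

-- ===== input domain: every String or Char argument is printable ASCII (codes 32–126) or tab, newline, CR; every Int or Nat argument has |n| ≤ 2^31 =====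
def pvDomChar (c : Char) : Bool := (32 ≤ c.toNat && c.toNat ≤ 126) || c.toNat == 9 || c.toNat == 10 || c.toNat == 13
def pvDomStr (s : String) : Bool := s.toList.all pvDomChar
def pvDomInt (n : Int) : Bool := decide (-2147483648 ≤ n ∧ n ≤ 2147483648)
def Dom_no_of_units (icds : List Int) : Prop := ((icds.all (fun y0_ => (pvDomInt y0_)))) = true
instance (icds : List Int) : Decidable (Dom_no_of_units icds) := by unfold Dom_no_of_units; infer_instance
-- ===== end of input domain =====

-- B replaces A's counting loop by a closed-form clamped slice "1234"[:len(icds)] (objective: simpler).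

-- ===== PORT A =====
-- the for-loop over range(0, len(icds)) with 'count', 'units' and the break at count==5
def noOfUnitsLoopA : List Int → Int → String → String
  | [], _, units => units
  | _ :: rest, count, units =>
    let count := count + 1
    if count == 5 then units
    else noOfUnitsLoopA rest count (units ++ PySem.Int.toStr count)

def no_of_units (icds : List Int) : String :=
  noOfUnitsLoopA (PySem.List.pyRange 0 (icds.length : Int) 1) 0 ""

-- ===== PORT B =====
def no_of_units_alt (icds : List Int) : String :=
  PySem.Str.slice "1234" none (some (icds.length : Int))

-- ===== PRECONDITION & SPEC =====
def Spec_no_of_units (icds : List Int) (out : String) : Prop := out = no_of_units_alt icds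
instance (icds : List Int) (out : String) : Decidable (Spec_no_of_units icds out) := by unfold Spec_no_of_units; infer_instance

-- ===== CLAIM (what is proved, stated in full; the proofs are below) =====
def Claim_equal_no_of_units : Prop := ∀ (icds : List Int), Dom_no_of_units icds → Spec_no_of_units icds (no_of_units icds)

-- ===== LEMMAS AND PROOFS =====

-- once count reaches 4 the next iteration breaks, whatever remains
theorem noOfUnitsLoopA_four (l : List Int) (u : String) : noOfUnitsLoopA l 4 u = u := by
  cases l <;> simp [noOfUnitsLoopA]

theorem alt_toList (icds : List Int) :
    (no_of_units_alt icds).toList = ("1234".toList).take icds.length := by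
  simp [no_of_units_alt, PySem.Str.slice, PySem.Chars.slice_eq_listSlice,
    PySem.List.slice_to_natCast]

theorem no_of_units_eq (icds : List Int) : no_of_units icds = no_of_units_alt icds := by
  have h : (no_of_units_alt icds).toList = ("1234".toList).take icds.length := alt_toList icds
  rcases icds with _ | ⟨a, _ | ⟨b, _ | ⟨c, _ | ⟨d, rest⟩⟩⟩⟩
  · decide
  · apply String.ext; rw [h]; simp only [no_of_units, List.length_cons, List.length_nil]; decide
  · apply String.ext; rw [h]; simp only [no_of_units, List.length_cons, List.length_nil]; decide
  · apply String.ext; rw [h]; simp only [no_of_units, List.length_cons, List.length_nil]; decide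
  · -- length ≥ 4: unfold the first four iterations of the range, then break
    apply String.ext
    rw [h]
    have htake : ("1234".toList).take (a :: b :: c :: d :: rest).length = "1234".toList := by
      apply List.take_of_length_le; simp
    rw [htake]
    have hn : ((a :: b :: c :: d :: rest).length : Int) = (rest.length : Int) + 4 := by
      simp; omega
    rw [no_of_units, hn]
    have e0 : PySem.List.pyRange 0 ((rest.length : Int) + 4) 1
        = 0 :: PySem.List.pyRange 1 ((rest.length : Int) + 4) 1 :=
      PySem.List.pyRange_one_cons (by omega)
    have e1 : PySem.List.pyRange 1 ((rest.length : Int) + 4) 1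
        = 1 :: PySem.List.pyRange 2 ((rest.length : Int) + 4) 1 := by
      have := PySem.List.pyRange_one_cons (a := 1) (b := (rest.length : Int) + 4) (by omega)
      simpa using this
    have e2 : PySem.List.pyRange 2 ((rest.length : Int) + 4) 1
        = 2 :: PySem.List.pyRange 3 ((rest.length : Int) + 4) 1 := by
      have := PySem.List.pyRange_one_cons (a := 2) (b := (rest.length : Int) + 4) (by omega)
      simpa using this
    have e3 : PySem.List.pyRange 3 ((rest.length : Int) + 4) 1
        = 3 :: PySem.List.pyRange 4 ((rest.length : Int) + 4) 1 := by
      have := PySem.List.pyRange_one_cons (a := 3) (b := (rest.length : Int) + 4) (by omega)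
      simpa using this
    rw [e0, e1, e2, e3]
    simp only [noOfUnitsLoopA]
    norm_num
    rw [noOfUnitsLoopA_four]
    decide

-- ===== VERDICT (by name: the statement is the Claim_ definition above) =====
theorem no_of_units_spec : Claim_equal_no_of_units := by
  intro icds _
  exact no_of_units_eq icds
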